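-- pv_equiv track=rewrite | github.com/jcaza010/Inverted-Index-Search | search.py | and_get_results3
-- ===== SOURCE A (Python) =====
-- def compare_two3(qinfo1, qinfo2):
--     new_qinfo = []
--     qinfo2 = dict(qinfo2)
--     for i in qinfo1:
--         try:
--             new_qinfo.append((i[0], i[1] + qinfo2[i[0]]))
--             #i[1] += qinfo2[i[0]]
--         except:
--             pass
--     return new_qinfo
--
-- def and_get_results3(query_info):
--     if len(query_info) == 1:
--         return query_info[0]
--     qinfo1 = sorted(query_info[0], key = lambda x: x[1], reverse = True)
--     for i in range(len(query_info) - 1):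
--         qinfo2 = query_info[i+1]
--         qinfo1 = compare_two3(qinfo1, qinfo2)
--     qinfo1 = sorted(qinfo1, key = lambda x: x[1], reverse = True)
--     return qinfo1
-- ===== SOURCE B (Python) =====
-- def and_get_results3(query_info):
--     if len(query_info) == 1:
--         return query_info[0]
--     dicts = [dict(lst) for lst in query_info[1:]]
--     results = []
--     for doc_id, score in sorted(query_info[0], key=lambda x: x[1], reverse=True):
--         if all(doc_id in d for d in dicts):
--             results.append((doc_id, score + sum(d[doc_id] for d in dicts)))
--     return sorted(results, key=lambda x: x[1], reverse=True)
-- ===== Notes on version B (the rewrite author's own statement) =====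
-- stated objective: alternative
-- what changed: Builds the lookup dicts for query_info[1:] once and intersects with a single pass over the sorted first list (membership test in every dict plus one summed lookup), instead of A's sequential shrinking-accumulator compare passes that rebuild a dict and emit a fresh intermediate list per posting list.
-- outside the precondition, e.g. on and_get_results3([]): A raises IndexError, B raises IndexError
import Mathlib
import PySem

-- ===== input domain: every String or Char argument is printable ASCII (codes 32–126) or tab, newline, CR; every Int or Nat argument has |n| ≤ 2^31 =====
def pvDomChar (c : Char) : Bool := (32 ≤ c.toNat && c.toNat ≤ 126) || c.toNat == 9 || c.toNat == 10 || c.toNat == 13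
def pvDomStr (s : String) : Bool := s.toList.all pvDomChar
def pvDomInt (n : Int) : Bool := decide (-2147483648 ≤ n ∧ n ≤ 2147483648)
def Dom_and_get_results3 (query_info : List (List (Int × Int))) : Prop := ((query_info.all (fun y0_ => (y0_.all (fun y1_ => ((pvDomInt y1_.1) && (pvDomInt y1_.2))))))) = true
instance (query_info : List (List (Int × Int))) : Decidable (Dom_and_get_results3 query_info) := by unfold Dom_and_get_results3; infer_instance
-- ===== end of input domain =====

-- B builds the lookup dicts once and intersects in a single pass over the sorted first list, instead of A's chained per-list compare passes (alternative decomposition, same asymptotic cost).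


-- ===== PORT A =====
def compare_two3 (qinfo1 qinfo2 : List (Int × Int)) : List (Int × Int) :=
  let d := PySem.Dict.ofList qinfo2
  qinfo1.foldl (fun acc i =>
    match d.get? i.1 with            -- try: qinfo2[i[0]] … except: pass
    | some v => acc ++ [(i.1, i.2 + v)]
    | none   => acc) []

def and_get_results3 (query_info : List (List (Int × Int))) : List (Int × Int) :=
  if query_info.length = 1 then PySem.List.pyGetD query_info 0 []
  else
    let qinfo1 := PySem.List.sorted (PySem.List.pyGetD query_info 0 []) (fun x => x.2) true
    let qinfo1 := (PySem.List.pyRange 0 ((query_info.length : Int) - 1) 1).foldl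
      (fun q1 i => compare_two3 q1 (PySem.List.pyGetD query_info (i + 1) [])) qinfo1
    PySem.List.sorted qinfo1 (fun x => x.2) true

-- ===== PORT B =====
def and_get_results3_alt (query_info : List (List (Int × Int))) : List (Int × Int) :=
  if query_info.length = 1 then PySem.List.pyGetD query_info 0 []
  else
    let dicts := query_info.tail.map (fun lst => PySem.Dict.ofList lst)
    let results := (PySem.List.sorted (PySem.List.pyGetD query_info 0 []) (fun x => x.2) true).foldl
      (fun acc p =>
        if dicts.all (fun d => d.contains p.1) then
          acc ++ [(p.1, p.2 + (dicts.map (fun d => d.getD p.1 0)).sum)]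
        else acc) []
    PySem.List.sorted results (fun x => x.2) true

-- ===== PRECONDITION & SPEC =====
-- A raises IndexError on query_info = [] (query_info[0] with no branch covering it); B raises there too.
def Pre_and_get_results3 (query_info : List (List (Int × Int))) : Prop := query_info ≠ []
instance (query_info : List (List (Int × Int))) : Decidable (Pre_and_get_results3 query_info) := by unfold Pre_and_get_results3; infer_instance
def pvWitness_and_get_results3 : (List (List (Int × Int))) := [[(1, 5), (2, 3)], [(2, 4), (1, 1)]]

def Spec_and_get_results3 (query_info : List (List (Int × Int))) (out : List (Int × Int)) : Prop := out = and_get_results3_alt query_info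
instance (query_info : List (List (Int × Int))) (out : List (Int × Int)) : Decidable (Spec_and_get_results3 query_info out) := by unfold Spec_and_get_results3; infer_instance

-- ===== CLAIM (what is proved, stated in full; the proofs are below) =====
def Claim_equal_and_get_results3 : Prop := ∀ (query_info : List (List (Int × Int))), Dom_and_get_results3 query_info → Pre_and_get_results3 query_info → Spec_and_get_results3 query_info (and_get_results3 query_info)

-- ===== LEMMAS AND PROOFS =====

-- one compare pass is a filter-by-membership + score-add map
lemma compare_two3_eq (q1 q2 : List (Int × Int)) :
    compare_two3 q1 q2 =
      (q1.filter (fun p => (PySem.Dict.ofList q2).contains p.1)).map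
        (fun p => (p.1, p.2 + (PySem.Dict.ofList q2).getD p.1 0)) := by
  unfold compare_two3
  set d := PySem.Dict.ofList q2 with hd
  rw [PySem.List.foldl_congr_mem
      (g := fun acc p => if d.contains p.1 then acc ++ [(p.1, p.2 + d.getD p.1 0)] else acc)]
  · rw [PySem.List.foldl_append_if]; simp
  · intro acc p _
    rw [PySem.Dict.contains_eq_isSome_get?, PySem.Dict.getD_eq_get?_getD]
    cases d.get? p.1 <;> simp

-- chaining compare passes over ds equals one filter-by-all + summed-lookup map
lemma chain_eq (ds : List (List (Int × Int))) (l : List (Int × Int)) :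
    ds.foldl (fun q1 q2 => compare_two3 q1 q2) l =
      (l.filter (fun p => (ds.map (fun q => PySem.Dict.ofList q)).all (fun d => d.contains p.1))).map
        (fun p => (p.1, p.2 + ((ds.map (fun q => PySem.Dict.ofList q)).map (fun d => d.getD p.1 0)).sum)) := by
  induction ds generalizing l with
  | nil => simp
  | cons d ds ih =>
    rw [List.foldl_cons, ih, compare_two3_eq, List.filter_map, List.map_map]
    simp only [List.map_cons, List.all_cons, List.sum_cons, Function.comp_def, List.filter_filter]
    congr 1
    · funext p; simp [add_assoc]
    · apply List.filter_congr; intro p _; simp [Bool.and_comm]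

lemma b_loop_eq (ds : List (PySem.Dict Int Int)) (l : List (Int × Int)) :
    l.foldl (fun acc p =>
        if ds.all (fun d => d.contains p.1) then
          acc ++ [(p.1, p.2 + (ds.map (fun d => d.getD p.1 0)).sum)]
        else acc) [] =
      (l.filter (fun p => ds.all (fun d => d.contains p.1))).map
        (fun p => (p.1, p.2 + (ds.map (fun d => d.getD p.1 0)).sum)) := by
  rw [PySem.List.foldl_append_if]; simp

-- ===== VERDICT (by name: the statement is the Claim_ definition above) =====
theorem and_get_results3_spec : Claim_equal_and_get_results3 := by
  intro qi _ hpre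
  unfold Spec_and_get_results3 and_get_results3 and_get_results3_alt
  by_cases h1 : qi.length = 1
  · simp [h1]
  · simp only [h1, if_false]
    obtain ⟨h, t, rfl⟩ : ∃ h t, qi = h :: t := by
      cases qi with
      | nil => exact absurd rfl hpre
      | cons h t => exact ⟨h, t, rfl⟩
    have hrange : (PySem.List.pyRange 0 ((((h :: t : List (List (Int × Int))).length : Int)) - 1) 1).foldl
        (fun q1 i => compare_two3 q1 (PySem.List.pyGetD (h :: t) (i + 1) [])) (PySem.List.sorted h (fun x => x.2) true)
        = t.foldl (fun q1 q2 => compare_two3 q1 q2) (PySem.List.sorted h (fun x => x.2) true) := by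
      have h2 := PySem.List.foldl_pyRange_pyGetD' (xs := h :: t) (d := ([] : List (Int × Int)))
        (f := fun q1 q2 => compare_two3 q1 q2) (init := PySem.List.sorted h (fun x => x.2) true)
        (a := 1) (by norm_num)
      rw [PySem.List.pyRange_one, List.foldl_map] at h2
      rw [PySem.List.pyRange_one, List.foldl_map]
      simpa [add_comm] using h2
    rw [PySem.List.pyGetD_zero_cons, hrange, chain_eq,
        b_loop_eq, show (h :: t : List (List (Int × Int))).tail = t from rfl]
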